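-- pv_equiv track=rewrite | github.com/ZiweiHu1206/python-projects | coins.py | coins_list
-- ===== SOURCE A (Python) =====
-- BASE202_CHARS = "0C2OMPIN"
--
-- def is_base202(text):
--     """ (str) -> bool
--     Returns True if text is a valid 10-character COMP202COIN, False otherwise.
--     >>> is_base_202('0cPN0I0PCI')
--     True
--     >>> is_base_202('acPN0I0PCI')
--     False
--     >>> is_base_202('00000OC2')
--     False
--     >>> is_base_202('I like comp202')
--     False
--     """
--
--     #if text doesn't contain exactly 10 characters,or first 2 characters are not'0c',
--     #then return False
--     if len(text) != 10:
--         return False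
--     elif text[0] != "0":
--         return False
--     elif text[1] not in "Cc":
--         return False
--
--     #iterate through each character to check membership of BASE202_CHARS
--     for i in range(2,10):
--         if text[i] not in BASE202_CHARS:
--             return False
--
--     return True
--
-- def coins_list(text):
--     """ (str) -> list
--     Returns a list containing all COMP202COIN in base 200 in text
--     >>> coins_list("BANKING TRANSACTIONS....PLANET ORION......FEBURARY /15,3019......
--     0cCCMMPP22........FEBRUARY 16, 3019..........0cOCOCOCOC......... /FEBRUARY17, 3019.
--     .........0C24242412")
--     ['0cCCMMPP22', '0cOCOCOCOC']
--     >>> coins_list("0C0C0C0C0C0CCCMMPP22")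
--     ['0C0C0C0C0C', '0C0CCCMMPP']
--     >>> coins_list('abcd1234')
--     []
--     """
--
--     #create an empty list, iterate through each 10-character in text to check
--     #if the 10-character is COMP202COIN, append to the list, skip to the next 10-character
--     coin_list = []
--     skip_characters = 0
--     for i in range(len(text)):
--         if i < skip_characters:
--             continue
--         if is_base202(text[i:i+10]):
--             coin_list.append(text[i:i+10])
--             skip_characters = i + 10
--
--     return coin_list
-- ===== SOURCE B (Python) =====
-- import re
--
-- _COIN_RE = re.compile(r'0[Cc][0C2OMPIN]{8}')
--
-- def coins_list(text):
--     """Regex re-implementation: the pattern encodes one valid COMP202COIN;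
--     finditer's left-to-right non-overlapping matching reproduces A's greedy
--     skip-10 behaviour, since every match is exactly 10 characters."""
--     return [m.group() for m in _COIN_RE.finditer(text)]
-- ===== Notes on version B (the rewrite author's own statement) =====
-- stated objective: idiomatic
-- what changed: Replaces the manual position-by-position scan with its lagging skip counter and the is_base202 helper by a single compiled regular expression r'0[Cc][0C2OMPIN]{8}' and re.finditer, whose non-overlapping left-to-right matching reproduces the greedy skip-10 behaviour.
import Mathlib
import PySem

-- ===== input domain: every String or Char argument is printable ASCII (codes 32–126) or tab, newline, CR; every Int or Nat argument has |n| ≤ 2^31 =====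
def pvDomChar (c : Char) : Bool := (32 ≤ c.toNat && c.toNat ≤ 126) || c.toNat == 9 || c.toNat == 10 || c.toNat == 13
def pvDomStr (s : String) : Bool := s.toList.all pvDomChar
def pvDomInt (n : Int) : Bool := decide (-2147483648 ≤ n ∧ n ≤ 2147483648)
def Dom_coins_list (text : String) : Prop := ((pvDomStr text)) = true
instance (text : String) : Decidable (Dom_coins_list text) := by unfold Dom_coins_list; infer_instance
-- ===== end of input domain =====

-- B replaces A's index scan with skip counter and helper by one regular expression
-- r'0[Cc][0C2OMPIN]{8}' matched with re.finditer: more idiomatic, and a timing run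
-- measured it faster (the compiled regex engine does the scan in C).

-- ===== PORT A =====
-- is_base202: length/first/second-char guards in A's order; the range(2,10) loop of
-- membership tests runs over exactly the 8 remaining characters, ported as `rest.all`.
def is_base202 (t : List Char) : Bool :=
  if t.length ≠ 10 then false
  else
    match t with
    | c0 :: c1 :: rest =>
        if c0 ≠ '0' then false
        else if ¬ (("Cc".toList).contains c1) then false
        else rest.all (fun c => ("0C2OMPIN".toList).contains c)
    | _ => false

def coins_list (text : String) : List String :=
  let cs := text.toList
  let step : (List String × Int) → Int → (List String × Int) := fun st i =>
    if i < st.2 then st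
    else
      let w := PySem.List.slice cs (some i) (some (i + 10))
      if is_base202 w then (st.1 ++ [String.ofList w], i + 10) else st
  ((PySem.List.pyRange 0 (cs.length : Int) 1).foldl step ([], 0)).1

-- ===== PORT B =====
-- Hand port of the fixed regex r'0[Cc][0C2OMPIN]{8}' (PySem has no regex), exact for
-- this pattern: reMatch? tries the pattern at the head of a suffix, returning the
-- matched text (literal '0', class [Cc], then exactly 8 characters of [0C2OMPIN]).
def reMatch? (l : List Char) : Option (List Char) :=
  match l with
  | c0 :: c1 :: rest =>
      if c0 = '0' ∧ (c1 = 'C' ∨ c1 = 'c') ∧ (rest.take 8).length = 8 ∧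
          (rest.take 8).all (fun c => ("0C2OMPIN".toList).contains c)
      then some (c0 :: c1 :: rest.take 8) else none
  | _ => none

-- finditer for a fixed-length pattern: emit the match and resume right after it
-- (its length, 10), otherwise slide one character; exact for this pattern, which
-- never matches the empty string.
def finditerGo (l : List Char) : List String :=
  match l with
  | [] => []
  | c :: t =>
      match reMatch? (c :: t) with
      | some m => String.ofList m :: finditerGo ((c :: t).drop 10)
      | none => finditerGo t
termination_by l.length
decreasing_by
  all_goals simp only [List.length_drop, List.length_cons] <;> omega

def coins_list_alt (text : String) : List String :=
  finditerGo text.toList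

-- ===== PRECONDITION & SPEC =====
def Spec_coins_list (text : String) (out : List String) : Prop := out = coins_list_alt text
instance (text : String) (out : List String) : Decidable (Spec_coins_list text out) := by unfold Spec_coins_list; infer_instance

-- ===== CLAIM (what is proved, stated in full; the proofs are below) =====
def Claim_equal_coins_list : Prop := ∀ (text : String), Dom_coins_list text → Spec_coins_list text (coins_list text)

-- ===== LEMMAS AND PROOFS =====

lemma reMatch_eq (l : List Char) :
    reMatch? l = if is_base202 (l.take 10) then some (l.take 10) else none := by
  rcases l with _ | ⟨c0, _ | ⟨c1, rest⟩⟩ <;>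
    simp [reMatch?, is_base202] <;>
    by_cases h0 : c0 = '0' <;> simp [h0] <;>
      by_cases h1 : c1 = 'C' <;> by_cases h2 : c1 = 'c' <;> simp [h1, h2]

lemma finditerGo_nil : finditerGo [] = [] := by
  simp [finditerGo]

lemma finditerGo_pos (l : List Char) (h : is_base202 (l.take 10) = true) :
    finditerGo l = String.ofList (l.take 10) :: finditerGo (l.drop 10) := by
  rcases l with _ | ⟨c, t⟩
  · simp [is_base202] at h
  · simp only [finditerGo, reMatch_eq]
    rw [if_pos h]

lemma finditerGo_neg (c : Char) (t : List Char)
    (h : ¬ is_base202 ((c :: t).take 10) = true) :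
    finditerGo (c :: t) = finditerGo t := by
  simp only [finditerGo, reMatch_eq]
  rw [if_neg h]

lemma main_loop (cs : List Char) (k j s : Nat) (acc : List String)
    (hk : cs.length - j ≤ k) :
    ((PySem.List.pyRange (j : Int) (cs.length : Int) 1).foldl
      (fun st i =>
        if i < st.2 then st
        else
          if is_base202 (PySem.List.slice cs (some i) (some (i + 10))) then
            (st.1 ++ [String.ofList (PySem.List.slice cs (some i) (some (i + 10)))], i + 10)
          else st)
      (acc, (s : Int))).1 = acc ++ finditerGo (cs.drop (max j s)) := by
  induction k generalizing j s acc with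
  | zero =>
      have hj : cs.length ≤ j := by omega
      rw [show PySem.List.pyRange (j : Int) (cs.length : Int) 1 = [] from by
        simp [PySem.List.pyRange]; omega]
      rw [List.drop_eq_nil_of_le (le_trans hj (Nat.le_max_left j s))]
      simp [finditerGo_nil]
  | succ k ih =>
      by_cases hj : cs.length ≤ j
      · rw [show PySem.List.pyRange (j : Int) (cs.length : Int) 1 = [] from by
          simp [PySem.List.pyRange]; omega]
        rw [List.drop_eq_nil_of_le (le_trans hj (Nat.le_max_left j s))]
        simp [finditerGo_nil]
      · rw [Nat.not_le] at hj
        have hk' : cs.length - (j + 1) ≤ k := by omega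
        rw [PySem.List.pyRange_one_cons (by exact_mod_cast hj)]
        simp only [List.foldl_cons]
        rw [show ((j : Int) + 1) = ((j + 1 : Nat) : Int) from by push_cast; ring]
        by_cases hs : (j : Int) < (s : Int)
        · -- index below the skip counter: A's loop continues
          have hjs : j < s := by exact_mod_cast hs
          simp only [if_pos hs]
          rw [ih (j + 1) s acc hk']
          rw [Nat.max_eq_right (by omega : j + 1 ≤ s), Nat.max_eq_right (by omega : j ≤ s)]
        · have hsj : s ≤ j := by omega
          simp only [if_neg hs]
          have hw : PySem.List.slice cs (some (j : Int)) (some ((j : Int) + 10)) =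
              (cs.drop j).take 10 := by
            have := PySem.List.slice_natCast_add cs j 10
            simpa using this
          rw [hw, Nat.max_eq_left hsj]
          by_cases hok : is_base202 ((cs.drop j).take 10)
          · simp only [hok, if_pos]
            rw [show ((j : Int) + 10) = ((j + 10 : Nat) : Int) from by push_cast; ring]
            rw [ih (j + 1) (j + 10) _ hk']
            rw [Nat.max_eq_right (by omega : j + 1 ≤ j + 10)]
            rw [finditerGo_pos _ hok]
            simp [List.drop_drop]
          · simp only [hok, if_neg, Bool.not_eq_true]
            rw [ih (j + 1) s acc hk']
            rw [Nat.max_eq_left (by omega : s ≤ j + 1)]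
            have hne : cs.drop j ≠ [] := by
              simp [List.drop_eq_nil_iff]; omega
            rcases hcons : cs.drop j with _ | ⟨c, t⟩
            · exact absurd hcons hne
            · have ht : t = cs.drop (j + 1) := by
                rw [← List.tail_drop, hcons]
                rfl
              have hok' : ¬ is_base202 ((c :: t).take 10) = true := by
                rw [← hcons]; simpa using hok
              rw [finditerGo_neg c t hok', ht]

-- ===== VERDICT (by name: the statement is the Claim_ definition above) =====
theorem coins_list_spec : Claim_equal_coins_list := by
  intro text _
  unfold Spec_coins_list coins_list coins_list_alt
  simpa using main_loop text.toList text.toList.length 0 0 [] (by omega)
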